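-- pv_equiv track=rewrite | github.com/b-zhu524/usaco_practice | dec_21_bronze/walking_home/walking.py | k_is_2
-- ===== SOURCE A (Python) =====
-- def k_is_2(field, n):
--     res = (n-1) * 2
--     # right -> down -> right
--     for i in range(n):
--         h_in_bottom_row = "H" in field[i: n]
--         h_in_top_row = "H" in field[:i+1]
--         if h_in_bottom_row or h_in_top_row:
--             res -= 1
--             continue
--         for j in range(1, n):
--             idx = n * j + i
--             if field[idx] == "H":
--                 res -= 1
--
--     # down -> right -> down
--     for i in range(n):
--         flag = False
--         for col_i in range(i+1):
--             if field[n*col_i] == "H":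
--                 res -= 1
--                 flag = True
--                 break
--         if flag:
--             continue
--
--         flag = False
--         for col_j in range(i+1, n):
--             if field[n*col_j+n-1] == "H":
--                 res -= 1
--                 flag = True
--                 break
--         if flag:
--             continue
--
--         for j in range(n):
--             if field[i*n+j] == "H":
--                 res -= 1
--                 break
--     return res
-- ===== SOURCE B (Python) =====
-- def k_is_2(field, n):
--     # Single pre-scan with closed-form thresholds instead of A's nested loops with flags/breaks.
--     res = (n - 1) * 2
--     if n < 1:
--         return res
--     # block 1: for each column i, A's per-i row-0 test covers the whole first row,
--     # so it fires for every i iff row 0 contains an H; otherwise A counts every H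
--     # in rows 1..n-1 (no break), i.e. every H in the flat segment field[n:n*n].
--     if "H" in field[:n]:
--         res -= n
--     else:
--         res -= sum(c == "H" for c in field[n:n * n])
--     # block 2: first H-row in the left column (else n), last H-row in the right column (else -1)
--     first_left = next((c for c in range(n) if field[n * c] == "H"), n)
--     last_right = next((c for c in range(n - 1, -1, -1) if field[n * c + n - 1] == "H"), -1)
--     for i in range(n):
--         if first_left <= i or last_right >= i + 1 or "H" in field[i * n:i * n + n]:
--             res -= 1
--     return res
-- ===== Notes on version B (the rewrite author's own statement) =====
-- stated objective: alternative
-- what changed: One pre-scan replaces A's nested flag/break scans: a single first-row membership test plus one flat sum over rows 1..n-1 replaces the per-column loops, and first/last H positions in the two boundary columns turn A's per-i break loops into closed-form threshold comparisons.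
-- outside the precondition, e.g. on k_is_2('H', 2): A returns -2, B raises IndexError
import Mathlib
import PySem

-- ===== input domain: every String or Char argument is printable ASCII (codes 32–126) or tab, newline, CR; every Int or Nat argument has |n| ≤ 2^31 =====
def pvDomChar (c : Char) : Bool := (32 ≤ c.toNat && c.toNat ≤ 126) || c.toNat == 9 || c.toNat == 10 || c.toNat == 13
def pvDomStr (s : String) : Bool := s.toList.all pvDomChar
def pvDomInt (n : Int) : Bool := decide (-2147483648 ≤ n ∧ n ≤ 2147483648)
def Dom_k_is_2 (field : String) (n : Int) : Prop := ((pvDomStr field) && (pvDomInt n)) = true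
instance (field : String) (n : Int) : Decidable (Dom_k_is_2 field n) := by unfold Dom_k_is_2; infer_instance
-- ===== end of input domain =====

-- B replaces A's nested flag/break scans by one pre-scan (first-row test, flat H-sum,
-- first/last boundary-column H positions used as thresholds); alternative decomposition, same cost.


-- ===== PORT A =====
-- literal transliteration of A; field[idx] is pyGetD (in range on Pre_), "H" in t is Chars.isIn
def k_is_2 (field : String) (n : Int) : Int :=
  let s := field.toList
  let res0 : Int := (n - 1) * 2
  -- right -> down -> right
  let res1 := (PySem.List.pyRange 0 n 1).foldl (fun res i =>
    let h_in_bottom_row := PySem.Chars.isIn ['H'] (PySem.List.slice s (some i) (some n))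
    let h_in_top_row := PySem.Chars.isIn ['H'] (PySem.List.slice s none (some (i + 1)))
    if h_in_bottom_row || h_in_top_row then res - 1
    else (PySem.List.pyRange 1 n 1).foldl (fun res j =>
      if PySem.List.pyGetD s (n * j + i) ' ' == 'H' then res - 1 else res) res) res0
  -- down -> right -> down  (each break-out loop subtracts 1 at its first hit: List.any)
  (PySem.List.pyRange 0 n 1).foldl (fun res i =>
    if (PySem.List.pyRange 0 (i + 1) 1).any (fun col_i => PySem.List.pyGetD s (n * col_i) ' ' == 'H') then
      res - 1
    else if (PySem.List.pyRange (i + 1) n 1).any (fun col_j => PySem.List.pyGetD s (n * col_j + n - 1) ' ' == 'H') then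
      res - 1
    else if (PySem.List.pyRange 0 n 1).any (fun j => PySem.List.pyGetD s (i * n + j) ' ' == 'H') then
      res - 1
    else res) res1

-- ===== PORT B =====
-- literal transliteration of Source B; next((... for c in range ...), default) is find? ∘ getD
def k_is_2_alt (field : String) (n : Int) : Int :=
  let res0 : Int := (n - 1) * 2
  if n < 1 then res0
  else
    let s := field.toList
    let res1 :=
      if PySem.Chars.isIn ['H'] (PySem.List.slice s none (some n)) then res0 - n
      else res0 - ((PySem.List.slice s (some n) (some (n * n))).map
                    (fun c => if c == 'H' then (1 : Int) else 0)).sum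
    let firstLeft : Int :=
      (((PySem.List.pyRange 0 n 1).find? (fun c => PySem.List.pyGetD s (n * c) ' ' == 'H')).getD n)
    let lastRight : Int :=
      (((PySem.List.pyRange (n - 1) (-1) (-1)).find? (fun c => PySem.List.pyGetD s (n * c + n - 1) ' ' == 'H')).getD (-1))
    (PySem.List.pyRange 0 n 1).foldl (fun res i =>
      if firstLeft ≤ i || lastRight ≥ i + 1 ||
         PySem.Chars.isIn ['H'] (PySem.List.slice s (some (i * n)) (some (i * n + n))) then res - 1
      else res) res1

-- ===== PRECONDITION & SPEC =====
-- Pre_ excludes fields shorter than n*n cells (for n ≥ 1): there A raises IndexError except when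
-- an early 'H' short-circuits every indexing (an accident of evaluation order, e.g. ("H", 2) where
-- A returns -2); B indexes the boundary columns unconditionally and raises there.
def Pre_k_is_2 (field : String) (n : Int) : Prop :=
  n < 1 ∨ n * n ≤ (field.toList.length : Int)
instance (field : String) (n : Int) : Decidable (Pre_k_is_2 field n) := by
  unfold Pre_k_is_2; infer_instance
def pvWitness_k_is_2 : String × Int := ("H...G.eLn", 3)

def Spec_k_is_2 (field : String) (n : Int) (out : Int) : Prop := out = k_is_2_alt field n
instance (field : String) (n : Int) (out : Int) : Decidable (Spec_k_is_2 field n out) := by unfold Spec_k_is_2; infer_instance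

-- ===== CLAIM (what is proved, stated in full; the proofs are below) =====
def Claim_equal_k_is_2 : Prop := ∀ (field : String) (n : Int), Dom_k_is_2 field n → Pre_k_is_2 field n → Spec_k_is_2 field n (k_is_2 field n)

-- ===== LEMMAS AND PROOFS =====

theorem pv_pyRange_one_eq (a b : Int) :
    PySem.List.pyRange a b 1 = (List.range (b - a).toNat).map (fun (k : Nat) => a + (k : Int)) := by
  unfold PySem.List.pyRange
  rw [if_neg (by norm_num)]
  rcases lt_or_ge a b with h | h
  · simp only [if_pos one_pos, if_pos h, Int.ediv_one]
    rw [(by ring : b - a + 1 - 1 = b - a)]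
    exact List.map_congr_left (fun k _ => by ring)
  · rw [if_pos one_pos, if_neg (by omega), (by omega : (b - a).toNat = 0)]
    simp

theorem pv_pyRange_negOne_eq (a b : Int) :
    PySem.List.pyRange a b (-1) = (List.range (a - b).toNat).map (fun (k : Nat) => a - (k : Int)) := by
  unfold PySem.List.pyRange
  rw [if_neg (by norm_num)]
  rcases lt_or_ge b a with h | h
  · rw [if_neg (by norm_num), if_pos h]
    simp only [Int.ediv_one, neg_neg]
    rw [(by ring : a - b + 1 - 1 = a - b)]
    exact List.map_congr_left (fun k _ => by ring)
  · rw [if_neg (by norm_num), if_neg (by omega), (by omega : (a - b).toNat = 0)]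
    simp

theorem pv_foldl_sub {α : Type} (l : List α) (g : α → Int) (a : Int) :
    l.foldl (fun r x => r - g x) a = a - (l.map g).sum := by
  induction l generalizing a with
  | nil => simp
  | cons x xs ih => simp [List.foldl_cons, ih]; ring

theorem pv_sum_map_range (M : Nat) (f : Nat → Int) :
    ((List.range M).map f).sum = ∑ x ∈ Finset.range M, f x := by
  induction M with
  | zero => simp
  | succ m ih => rw [List.range_succ, Finset.sum_range_succ]; simp [ih]

theorem pv_cntP_range_sum (q : Nat → Bool) (M : Nat) :
    ((List.range M).countP q : Int) = ∑ x ∈ Finset.range M, (if q x then (1:Int) else 0) := by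
  rw [← PySem.List.sum_map_ite_one_zero q (List.range M), pv_sum_map_range]

theorem pv_isIn_singleton (c : Char) (t : List Char) :
    PySem.Chars.isIn [c] t = true ↔ c ∈ t := by
  rw [PySem.Chars.isIn_iff_infix]
  constructor
  · intro h; exact h.mem (by simp)
  · intro h
    obtain ⟨u, v, rfl⟩ := List.append_of_mem h
    exact ⟨u, v, by simp⟩

theorem pv_mem_drop_take_iff (s : List Char) (c : Char) (a m : Nat) (h : a + m ≤ s.length) :
    c ∈ (s.drop a).take m ↔ ∃ j, j < m ∧ s.getD (a + j) ' ' = c := by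
  rw [List.mem_iff_getElem]
  constructor
  · rintro ⟨i, hi, rfl⟩
    have hlen : i < m := by simp at hi; omega
    have hia : a + i < s.length := by omega
    have hid : i < (List.drop a s).length := by simp; omega
    exact ⟨i, hlen, by rw [List.getD_eq_getElem s ' ' hia,
      ← List.getElem_drop (h := hid), ← List.getElem_take]⟩
  · rintro ⟨j, hj, hget⟩
    have hlen : j < ((s.drop a).take m).length := by simp; omega
    refine ⟨j, hlen, ?_⟩
    rw [List.getElem_take, List.getElem_drop, ← List.getD_eq_getElem s ' ' (by omega : a + j < s.length), hget]

theorem pv_cntP_seg (s : List Char) (p : Char → Bool) (a M : Nat) (h : a + M ≤ s.length) :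
    (List.countP p (List.take M (List.drop a s))) = (List.range M).countP (fun j => p (s.getD (a + j) ' ')) := by
  induction M with
  | zero => simp
  | succ m ih =>
    have ham : a + m < s.length := by omega
    have h2 : (List.drop a s)[m]? = some (s[a+m]'ham) := by
      rw [List.getElem?_drop]
      exact List.getElem?_eq_getElem (by omega)
    have h1 : List.take (m+1) (List.drop a s) = List.take m (List.drop a s) ++ [s[a+m]'ham] := by
      rw [List.take_add_one, h2]
      rfl
    rw [h1, List.range_succ, List.countP_append, List.countP_append, ih (by omega)]
    have h3 : s.getD (a + m) ' ' = s[a+m]'ham := List.getD_eq_getElem s ' ' ham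
    simp only [List.countP_cons, List.countP_nil, h3]

theorem pv_find_range_some (q : Nat → Bool) (N v : Nat)
    (h : (List.range N).find? q = some v) : q v = true ∧ v < N ∧ ∀ c < v, q c = false := by
  refine ⟨List.find?_some h, List.mem_range.mp (List.mem_of_find?_eq_some h), ?_⟩
  rw [List.find?_eq_some_iff_append] at h
  obtain ⟨hq, as, bs, heq, hprev⟩ := h
  have hlen : as.length < N := by
    have := congrArg List.length heq
    simp at this; omega
  have has : as = List.range as.length := by
    have ht : (List.range N).take as.length = as := by
      rw [heq]; simp
    conv_lhs => rw [← ht]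
    rw [List.take_range, Nat.min_eq_left (by omega)]
  have hv : v = as.length := by
    have h0 : as.length < (List.range N).length := by simp; omega
    have h2 := List.getElem_of_eq heq h0
    rw [List.getElem_range, List.getElem_append_right (Nat.le_refl _)] at h2
    simpa using h2.symm
  intro c hc
  have : c ∈ as := by rw [has, List.mem_range]; omega
  simpa using hprev c this
theorem pv_foldl_sub_ite {α : Type} (q : α → Bool) (l : List α) (a : Int) :
    l.foldl (fun r x => if q x then r - 1 else r) a = a - (l.countP q : Int) := by
  rw [PySem.List.foldl_congr_mem l _ (fun r x => r - (if q x then (1:Int) else 0)) a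
    (by intro r x _; by_cases h : q x <;> simp [h]), pv_foldl_sub,
    PySem.List.sum_map_ite_one_zero]

theorem pv_mem_take_iff (s : List Char) (c : Char) (m : Nat) (h : m ≤ s.length) :
    c ∈ s.take m ↔ ∃ j, j < m ∧ s.getD j ' ' = c := by
  have := pv_mem_drop_take_iff s c 0 m (by omega)
  simpa using this

theorem pv_cond_eq (s : List Char) (N k : Nat) (hk : k < N) (hlen : N ≤ s.length) :
    (PySem.Chars.isIn ['H'] (PySem.List.slice s (some (k:Int)) (some (N:Int))) ||
     PySem.Chars.isIn ['H'] (PySem.List.slice s none (some ((k:Int)+1)))) =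
    PySem.Chars.isIn ['H'] (PySem.List.slice s none (some (N:Int))) := by
  rw [PySem.List.slice_natCast]
  rw [(by push_cast; ring : ((k:Int)+1) = ((k+1:Nat):Int))]
  rw [PySem.List.slice_to s (by positivity), PySem.List.slice_to s (by positivity)]
  simp only [Int.toNat_natCast]
  rw [Bool.eq_iff_iff]
  simp only [Bool.or_eq_true, pv_isIn_singleton]
  rw [pv_mem_drop_take_iff s 'H' k (N - k) (by omega),
      pv_mem_take_iff s 'H' (k+1) (by omega), pv_mem_take_iff s 'H' N hlen]
  constructor
  · rintro (⟨j, hj, hg⟩ | ⟨j, hj, hg⟩)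
    · exact ⟨k + j, by omega, hg⟩
    · exact ⟨j, by omega, hg⟩
  · rintro ⟨j, hj, hg⟩
    by_cases hjk : j ≤ k
    · exact Or.inr ⟨j, by omega, hg⟩
    · exact Or.inl ⟨j - k, by omega, by rw [(by omega : k + (j - k) = j)]; exact hg⟩

theorem pv_rows (s : List Char) (p : Char → Bool) (N : Nat) (M : Nat) (h : N * M + N ≤ s.length) :
    (List.range (N * M)).countP (fun t => p (s.getD (N + t) ' ')) =
    ∑ j ∈ Finset.range M, (List.range N).countP (fun i2 => p (s.getD (N * (1 + j) + i2) ' ')) := by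
  induction M with
  | zero => simp
  | succ m ih =>
    have hm : N * m + N ≤ s.length := by
      have : N * m ≤ N * (m+1) := Nat.mul_le_mul_left _ (by omega)
      omega
    rw [(by ring : N * (m + 1) = N * m + N), List.range_add, List.countP_append,
        List.countP_map, Finset.sum_range_succ, ih hm]
    congr 1
    refine List.countP_congr (fun x hx => ?_)
    simp only [Function.comp_apply]
    rw [(by ring : N + (N * m + x) = N * (1 + m) + x)]

theorem pv_count_swap (s : List Char) (N : Nat) (hN : 1 ≤ N) (hlen : N * N ≤ s.length) :
    (∑ k ∈ Finset.range N,
      (((List.range (N - 1)).countP (fun t => s.getD (N * (1 + t) + k) ' ' == 'H') : Nat) : Int)) =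
    ((List.take (N * N - N) (List.drop N s)).map (fun c => if c == 'H' then (1:Int) else 0)).sum := by
  have hNN : N ≤ N * N := Nat.le_mul_of_pos_left N (by omega)
  rw [PySem.List.sum_map_ite_one_zero]
  rw [pv_cntP_seg s _ N (N * N - N) (by omega)]
  have hMN : N * (N - 1) = N * N - N := by
    rw [Nat.mul_sub]; omega
  rw [← hMN, pv_rows s (fun c => c == 'H') N (N - 1) (by rw [hMN]; omega)]
  push_cast [pv_cntP_range_sum]
  rw [Finset.sum_comm]

theorem pv_first_le (pL : Int → Bool) (q : Nat → Bool) (hpq : ∀ t : Nat, pL (t:Int) = q t)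
    (N k : Nat) (hk : k < N) :
    (List.range (k+1)).any (fun t => pL (t:Int)) =
    decide (((((List.range N).map (fun (t:Nat) => (t:Int))).find? pL).getD (N:Int)) ≤ (k:Int)) := by
  rw [List.find?_map]
  have hc : (pL ∘ fun (t:Nat) => (t:Int)) = q := funext hpq
  rw [hc]
  rw [Bool.eq_iff_iff]
  simp only [List.any_eq_true, List.mem_range, hpq, decide_eq_true_eq]
  cases hf : (List.range N).find? q with
  | none =>
    have hnone := List.find?_eq_none.mp hf
    simp only [Option.map_none, Option.getD_none]
    constructor
    · rintro ⟨t, ht, hq⟩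
      exact absurd hq (by simpa using hnone t (List.mem_range.mpr (by omega)))
    · intro h; omega
  | some v =>
    obtain ⟨hqv, hvN, hmin⟩ := pv_find_range_some q N v hf
    simp only [Option.map_some, Option.getD_some, Nat.cast_le]
    constructor
    · rintro ⟨t, ht, hq⟩
      by_contra hlt
      exact absurd hq (by simpa using hmin t (by omega))
    · intro h; exact ⟨v, by omega, hqv⟩

theorem pv_last_ge (pR : Int → Bool) (q : Nat → Bool) (hpq : ∀ t : Nat, pR (t:Int) = q t)
    (N k : Nat) (hN : 1 ≤ N) (hk : k < N) :
    (List.range (N - (k+1))).any (fun t => pR ((k:Int) + 1 + (t:Int))) =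
    decide ((k:Int) + 1 ≤ ((((List.range N).map (fun (t:Nat) => (N:Int) - 1 - (t:Int))).find? pR).getD (-1))) := by
  have hmc : (List.range N).map (fun (t:Nat) => (N:Int) - 1 - (t:Int)) =
      (List.range N).map (fun (t:Nat) => (((N - 1 - t : Nat)):Int)) := by
    refine List.map_congr_left (fun t ht => ?_)
    have := List.mem_range.mp ht
    push_cast [Nat.cast_sub (by omega : t ≤ N - 1), Nat.cast_sub (by omega : 1 ≤ N)]
    ring
  rw [hmc, (by rw [List.map_map]; rfl :
        (List.range N).map (fun (t:Nat) => (((N - 1 - t : Nat)):Int)) =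
        ((List.range N).map (fun t => N - 1 - t)).map (fun (t:Nat) => (t:Int))),
      List.find?_map, List.find?_map]
  have hc : (pR ∘ fun (t:Nat) => (t:Int)) ∘ (fun t => N - 1 - t) = (fun t => q (N - 1 - t)) := by
    funext t; simp [hpq]
  rw [hc]
  rw [Bool.eq_iff_iff]
  simp only [List.any_eq_true, List.mem_range, decide_eq_true_eq]
  cases hf : (List.range N).find? (fun t => q (N - 1 - t)) with
  | none =>
    have hnone := List.find?_eq_none.mp hf
    simp only [Option.map_none, Option.getD_none]
    constructor
    · rintro ⟨t, ht, hq⟩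
      rw [(by push_cast; ring : (k:Int) + 1 + (t:Int) = ((k + 1 + t : Nat):Int)), hpq] at hq
      have : q (N - 1 - (N - 1 - (k + 1 + t))) = false := by
        simpa using hnone (N - 1 - (k + 1 + t)) (List.mem_range.mpr (by omega))
      rw [(by omega : N - 1 - (N - 1 - (k + 1 + t)) = k + 1 + t)] at this
      exact absurd hq (by simp [this])
    · intro h
      exfalso
      have : ¬ ((k:Int) + 1 ≤ -1) := by omega
      exact this h
  | some v =>
    obtain ⟨hqv, hvN, hmin⟩ := pv_find_range_some _ N v hf
    simp only [Option.map_some, Option.getD_some]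
    have hcast : ((k:Int) + 1 ≤ ((N - 1 - v : Nat):Int)) ↔ k + 1 ≤ N - 1 - v := by
      omega
    rw [hcast]
    constructor
    · rintro ⟨t, ht, hq⟩
      rw [(by push_cast; ring : (k:Int) + 1 + (t:Int) = ((k + 1 + t : Nat):Int)), hpq] at hq
      -- c := k+1+t satisfies q; show k+1 ≤ N-1-v
      by_contra hgt
      -- then k+1+t > N-1-v, i.e. N-1-(k+1+t) < v, so q (k+1+t) = false
      have hfalse := hmin (N - 1 - (k + 1 + t)) (by omega)
      rw [(by omega : N - 1 - (N - 1 - (k + 1 + t)) = k + 1 + t)] at hfalse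
      exact absurd hq (by simp [hfalse])
    · intro h
      refine ⟨N - 1 - v - (k + 1), by omega, ?_⟩
      rw [(by push_cast [Nat.cast_sub (by omega : k + 1 ≤ N - 1 - v)]; ring :
            (k:Int) + 1 + ((N - 1 - v - (k+1) : Nat):Int) = ((N - 1 - v : Nat):Int)), hpq]
      exact hqv
theorem pv_ite_or3 (a b c : Bool) (r : Int) :
    (if a then r - 1 else if b then r - 1 else if c then r - 1 else r) =
    (if a || b || c then r - 1 else r) := by
  cases a <;> cases b <;> cases c <;> simp

theorem pv_row (s : List Char) (N k : Nat) (hk : k < N) (hlen : N * N ≤ s.length) :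
    (List.range N).any (fun j => PySem.List.pyGetD s ((k:Int) * (N:Int) + (j:Int)) ' ' == 'H') =
    PySem.Chars.isIn ['H'] (PySem.List.slice s (some ((k:Int) * (N:Int))) (some ((k:Int) * (N:Int) + (N:Int)))) := by
  have hmem : k * N + N ≤ s.length := by
    have h1 : (k + 1) * N ≤ N * N := Nat.mul_le_mul_right N (by omega)
    have h2 : (k + 1) * N = k * N + N := by ring
    omega
  rw [(by push_cast; ring : (k:Int) * (N:Int) = ((k * N : Nat):Int)),
      (by push_cast; ring : ((k * N : Nat):Int) + (N:Int) = ((k * N + N : Nat):Int)),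
      PySem.List.slice_natCast]
  rw [Bool.eq_iff_iff]
  rw [pv_isIn_singleton]
  rw [(by omega : k * N + N - k * N = N)]
  rw [pv_mem_drop_take_iff s 'H' (k * N) N hmem]
  simp only [List.any_eq_true, List.mem_range]
  constructor
  · rintro ⟨j, hj, hq⟩
    rw [(by push_cast; ring : ((k * N : Nat):Int) + (j:Int) = ((k * N + j : Nat):Int)),
        PySem.List.pyGetD_natCast] at hq
    exact ⟨j, hj, by simpa using hq⟩
  · rintro ⟨j, hj, hq⟩
    refine ⟨j, hj, ?_⟩
    rw [(by push_cast; ring : ((k * N : Nat):Int) + (j:Int) = ((k * N + j : Nat):Int)),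
        PySem.List.pyGetD_natCast]
    simpa using hq

theorem pv_main (field : String) (N : Nat) (hN : 1 ≤ N) (hlen : N * N ≤ field.toList.length) :
    k_is_2 field ((N : Nat) : Int) = k_is_2_alt field ((N : Nat) : Int) := by
  have hNN : N ≤ N * N := Nat.le_mul_of_pos_left N (by omega)
  simp only [k_is_2, k_is_2_alt]
  rw [if_neg (by omega : ¬ ((N:Int) < 1))]
  set s := field.toList with hs
  rw [PySem.List.pyRange_zero_natCast,
      pv_pyRange_one_eq 1 (N:Int), (by omega : ((N:Int) - 1).toNat = N - 1),
      pv_pyRange_negOne_eq ((N:Int) - 1) (-1), (by omega : ((N:Int) - 1 - (-1)).toNat = N)]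
  simp only [List.foldl_map, ge_iff_le]
  -- ===== block 1 =====
  have hA1 : (List.range N).foldl (fun res (k : Nat) =>
      if (PySem.Chars.isIn ['H'] (PySem.List.slice s (some ((k:Nat):Int)) (some (N:Int))) ||
          PySem.Chars.isIn ['H'] (PySem.List.slice s none (some (((k:Nat):Int) + 1)))) then res - 1
      else (List.range (N-1)).foldl (fun res (t : Nat) =>
        if PySem.List.pyGetD s ((N:Int) * (1 + ((t:Nat):Int)) + ((k:Nat):Int)) ' ' == 'H' then res - 1 else res) res)
      (((N:Int) - 1) * 2) =
      (if PySem.Chars.isIn ['H'] (PySem.List.slice s none (some (N:Int))) then ((N:Int) - 1) * 2 - (N:Int)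
       else ((N:Int) - 1) * 2 -
        ((PySem.List.slice s (some (N:Int)) (some ((N:Int) * (N:Int)))).map
          (fun c => if c == 'H' then (1 : Int) else 0)).sum) := by
    rw [PySem.List.foldl_congr_mem (List.range N) _
        (fun res (k : Nat) =>
          if PySem.Chars.isIn ['H'] (PySem.List.slice s none (some (N:Int))) then res - 1
          else res - (((List.range (N - 1)).countP (fun t => s.getD (N * (1 + t) + k) ' ' == 'H') : Nat) : Int))
        (((N:Int) - 1) * 2) ?hcongr]
    case hcongr =>
      intro r k hk
      rw [pv_cond_eq s N k (List.mem_range.mp hk) (le_trans hNN hlen)]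
      by_cases hrow : PySem.Chars.isIn ['H'] (PySem.List.slice s none (some (N:Int))) = true
      · simp only [hrow, if_true]
      · have hrowf : PySem.Chars.isIn ['H'] (PySem.List.slice s none (some (N:Int))) = false := by
          simpa using hrow
        simp only [hrowf, Bool.false_eq_true, if_false]
        have hidx : ∀ t : Nat, PySem.List.pyGetD s ((N:Int) * (1 + ((t:Nat):Int)) + ((k:Nat):Int)) ' ' =
            s.getD (N * (1 + t) + k) ' ' := by
          intro t
          rw [(by push_cast; ring : ((N:Int) * (1 + ((t:Nat):Int)) + ((k:Nat):Int)) = ((N * (1 + t) + k : Nat):Int)),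
              PySem.List.pyGetD_natCast]
        simp only [hidx]
        exact pv_foldl_sub_ite (fun t => s.getD (N * (1 + t) + k) ' ' == 'H') (List.range (N-1)) r
    by_cases hrow : PySem.Chars.isIn ['H'] (PySem.List.slice s none (some (N:Int))) = true
    · simp only [hrow, if_true]
      rw [PySem.List.foldl_congr_mem (List.range N) _
            (fun (r : Int) (k : Nat) => r - (fun (_ : Nat) => (1:Int)) k) _ (by intro r k _; rfl),
          pv_foldl_sub]
      simp
    · have hrow' : PySem.Chars.isIn ['H'] (PySem.List.slice s none (some (N:Int))) = false := by
        simpa using hrow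
      simp only [hrow', Bool.false_eq_true, if_false]
      rw [PySem.List.foldl_congr_mem (List.range N) _
            (fun (r : Int) (k : Nat) =>
              r - (fun (k : Nat) => (((List.range (N - 1)).countP (fun t => s.getD (N * (1 + t) + k) ' ' == 'H') : Nat) : Int)) k)
            _ (by intro r k _; rfl),
          pv_foldl_sub, pv_sum_map_range, pv_count_swap s N hN hlen]
      rw [(by push_cast; ring : ((N:Int) * (N:Int)) = ((N * N : Nat):Int)), PySem.List.slice_natCast]
  rw [hA1]
  -- ===== block 2 =====
  refine PySem.List.foldl_congr_mem (List.range N) _ _ _ ?_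
  intro r k hk
  have hkN := List.mem_range.mp hk
  -- left column
  have hL : ((PySem.List.pyRange 0 (((k:Nat):Int) + 1) 1).any
        (fun col_i => PySem.List.pyGetD s ((N:Int) * col_i) ' ' == 'H')) =
      decide ((((((List.range N).map (fun (t:Nat) => (t:Int))).find?
          (fun c => PySem.List.pyGetD s ((N:Int) * c) ' ' == 'H')).getD (N:Int))) ≤ ((k:Nat):Int)) := by
    rw [(by push_cast; ring : (((k:Nat):Int) + 1) = ((k + 1 : Nat):Int)),
        PySem.List.pyRange_zero_natCast, List.any_map]
    rw [show ((fun col_i => PySem.List.pyGetD s ((N:Int) * col_i) ' ' == 'H') ∘ (fun (t:Nat) => (t:Int))) =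
        (fun (t:Nat) => (fun c => PySem.List.pyGetD s ((N:Int) * c) ' ' == 'H') ((t:Nat):Int)) from rfl]
    exact pv_first_le (fun c => PySem.List.pyGetD s ((N:Int) * c) ' ' == 'H')
      (fun t => s.getD (N * t) ' ' == 'H')
      (by intro t
          dsimp only
          rw [(by push_cast; ring : ((N:Int) * ((t:Nat):Int)) = ((N * t : Nat):Int)), PySem.List.pyGetD_natCast])
      N k hkN
  -- right column
  have hR : ((PySem.List.pyRange (((k:Nat):Int) + 1) (N:Int) 1).any
        (fun col_j => PySem.List.pyGetD s ((N:Int) * col_j + (N:Int) - 1) ' ' == 'H')) =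
      decide (((k:Nat):Int) + 1 ≤ ((((List.range N).map (fun (t:Nat) => ((N:Int) - 1) - (t:Int))).find?
          (fun c => PySem.List.pyGetD s ((N:Int) * c + (N:Int) - 1) ' ' == 'H')).getD (-1))) := by
    rw [pv_pyRange_one_eq (((k:Nat):Int) + 1) (N:Int),
        (by omega : ((N:Int) - (((k:Nat):Int) + 1)).toNat = N - (k + 1)), List.any_map]
    have hcomp : ((fun col_j => PySem.List.pyGetD s ((N:Int) * col_j + (N:Int) - 1) ' ' == 'H') ∘
        (fun (t:Nat) => ((k:Nat):Int) + 1 + (t:Int))) =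
        (fun (t:Nat) => (fun c => PySem.List.pyGetD s ((N:Int) * c + (N:Int) - 1) ' ' == 'H') (((k:Nat):Int) + 1 + ((t:Nat):Int))) := rfl
    rw [hcomp]
    have := pv_last_ge (fun c => PySem.List.pyGetD s ((N:Int) * c + (N:Int) - 1) ' ' == 'H')
      (fun t => s.getD (N * t + N - 1) ' ' == 'H')
      (by intro t
          dsimp only
          rw [(by push_cast [Nat.cast_sub (by omega : 1 ≤ N * t + N)]; ring :
              ((N:Int) * ((t:Nat):Int) + (N:Int) - 1) = ((N * t + N - 1 : Nat):Int)), PySem.List.pyGetD_natCast])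
      N k hN hkN
    rw [this]
  -- row
  simp only [List.any_map, Function.comp_def]
  simp only [pv_row s N k hkN hlen, hL, hR]
  exact pv_ite_or3 _ _ _ r

-- ===== VERDICT (by name: the statement is the Claim_ definition above) =====
theorem k_is_2_spec : Claim_equal_k_is_2 := by
  intro field n hdom hpre
  unfold Spec_k_is_2
  by_cases hn : n < 1
  · simp only [k_is_2, k_is_2_alt, if_pos hn]
    rw [pv_pyRange_one_eq 0 n, (by omega : (n - 0).toNat = 0)]
    simp
  · have hNeq : n = ((n.toNat : Nat) : Int) := by omega
    rw [hNeq]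
    apply pv_main
    · omega
    · rcases hpre with h | h
      · omega
      · have h2 : ((n.toNat * n.toNat : Nat) : Int) ≤ ((field.toList.length : Nat) : Int) := by
          push_cast
          calc ((n.toNat : Nat) : Int) * ((n.toNat : Nat) : Int) = n * n := by rw [← hNeq]
            _ ≤ (field.toList.length : Int) := h
        exact_mod_cast h2
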